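-- pv_equiv track=rewrite | github.com/Olive-Roe/tetris-AI | Tetris.py | _get_message_from_normal_line
-- ===== SOURCE A (Python) =====
-- def _get_message_from_normal_line(line):
--     lineStr = ""
--     counter = 0
--     for c in line:
--         if c == ".":
--             counter += 1
--         else:
--             lineStr += str(counter) + c if counter != 0 else c
--             counter = 0
--     # Add the counter one last time if it is still not 0
--     lineStr += str(counter) if counter != 0 else ""
--     return lineStr
-- ===== SOURCE B (Python) =====
-- def _get_message_from_normal_line(line):
--     # Run-based RLE: scan maximal runs of equal kind (dot / non-dot) and emit
--     # one piece per run, instead of A's char-by-char counter scan.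
--     out = []
--     i, n = 0, len(line)
--     while i < n:
--         key = line[i] == "."
--         j = i + 1
--         while j < n and (line[j] == ".") == key:
--             j += 1
--         out.append(str(j - i) if key else line[i:j])
--         i = j
--     return "".join(out)
-- ===== Notes on version B (the rewrite author's own statement) =====
-- stated objective: alternative
-- what changed: B scans the line as maximal runs of dots / non-dots with two index pointers and joins one piece per run, instead of A's char-by-char loop with a counter and repeated string concatenation.
import Mathlib
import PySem

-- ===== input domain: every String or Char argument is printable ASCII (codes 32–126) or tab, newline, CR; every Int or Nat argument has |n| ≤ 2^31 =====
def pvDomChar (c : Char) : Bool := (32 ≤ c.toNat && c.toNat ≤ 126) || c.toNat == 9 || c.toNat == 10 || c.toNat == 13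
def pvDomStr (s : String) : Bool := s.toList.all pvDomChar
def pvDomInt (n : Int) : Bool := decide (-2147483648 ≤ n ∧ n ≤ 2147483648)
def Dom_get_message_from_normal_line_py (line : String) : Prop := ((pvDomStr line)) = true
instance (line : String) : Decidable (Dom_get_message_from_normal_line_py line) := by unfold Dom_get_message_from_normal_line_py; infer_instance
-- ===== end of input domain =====

-- B replaces A's char-by-char counter scan by a run-at-a-time scan (one piece per
-- maximal run of dots / non-dots), joined at the end; same cost, different structure.

-- ===== PORT A =====
-- A-side helpers: the loop body and the final counter flush of A, as named functions
def pvStepA (st : List Char × Int) (c : Char) : List Char × Int :=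
  if c = '.' then (st.1, st.2 + 1)
  else (st.1 ++ (if st.2 ≠ 0 then PySem.Int.toChars st.2 ++ [c] else [c]), 0)

def pvFinA (st : List Char × Int) : List Char :=
  st.1 ++ (if st.2 ≠ 0 then PySem.Int.toChars st.2 else [])

-- char-by-char fold over the line: state = (lineStr as char list, counter)
def get_message_from_normal_line_py (line : String) : String :=
  String.mk (pvFinA (line.toList.foldl pvStepA ([], 0)))

-- ===== PORT B =====
-- one piece per maximal run: the inner index scan of Source B is the takeWhile/dropWhile
-- split at the first character whose kind differs from the run's kind
def pvAltPieces : List Char → List (List Char)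
  | [] => []
  | c :: cs =>
    let key := (c == '.')
    let run := (c :: cs).takeWhile (fun x => (x == '.') == key)
    let rest := (c :: cs).dropWhile (fun x => (x == '.') == key)
    (if key then PySem.Int.toChars (run.length : Int) else run) :: pvAltPieces rest
termination_by l => l.length
decreasing_by
  simp only [List.dropWhile, show ((c == '.') == (c == '.')) = true by simp]
  exact Nat.lt_succ_of_le (List.length_dropWhile_le _ _)

def get_message_from_normal_line_py_alt (line : String) : String :=
  String.mk (pvAltPieces line.toList).flatten

-- ===== PRECONDITION & SPEC =====
def Spec_get_message_from_normal_line_py (line : String) (out : String) : Prop := out = get_message_from_normal_line_py_alt line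
instance (line : String) (out : String) : Decidable (Spec_get_message_from_normal_line_py line out) := by unfold Spec_get_message_from_normal_line_py; infer_instance

-- ===== CLAIM (what is proved, stated in full; the proofs are below) =====
def Claim_equal_get_message_from_normal_line_py : Prop := ∀ (line : String), Dom_get_message_from_normal_line_py line → Spec_get_message_from_normal_line_py line (get_message_from_normal_line_py line)

-- ===== LEMMAS AND PROOFS =====

-- A's loop body restructured: what A appends after state (acc, counter) on input l, with acc factored out
def pvEnc (counter : Int) : List Char → List Char
  | [] => if counter ≠ 0 then PySem.Int.toChars counter else []
  | c :: cs =>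
    if c = '.' then pvEnc (counter + 1) cs
    else (if counter ≠ 0 then PySem.Int.toChars counter ++ [c] else [c]) ++ pvEnc 0 cs

theorem pvFoldA_eq_enc (l : List Char) : ∀ (acc : List Char) (counter : Int),
    pvFinA (l.foldl pvStepA (acc, counter)) = acc ++ pvEnc counter l := by
  induction l with
  | nil => intro acc counter; simp [pvFinA, pvEnc]
  | cons c cs ih =>
    intro acc counter
    by_cases hc : c = '.'
    · rw [List.foldl_cons,
        show pvStepA (acc, counter) c = (acc, counter + 1) from by simp [pvStepA, hc],
        ih,
        show pvEnc counter (c :: cs) = pvEnc (counter + 1) cs from by simp [pvEnc, hc]]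
    · rw [List.foldl_cons,
        show pvStepA (acc, counter) c
          = (acc ++ (if counter ≠ 0 then PySem.Int.toChars counter ++ [c] else [c]), 0) from by
            simp [pvStepA, hc],
        ih]
      simp [pvEnc, hc, List.append_assoc]

theorem pvEnc_dots (run : List Char) (h : ∀ x ∈ run, x = '.') :
    ∀ (counter : Int) (rest : List Char),
    pvEnc counter (run ++ rest) = pvEnc (counter + run.length) rest := by
  induction run with
  | nil => intro counter rest; simp
  | cons c cs ih =>
    intro counter rest
    have hc : c = '.' := h c (by simp)
    have h' : ∀ x ∈ cs, x = '.' := fun x hx => h x (by simp [hx])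
    rw [List.cons_append,
      show pvEnc counter (c :: (cs ++ rest)) = pvEnc (counter + 1) (cs ++ rest) from by
        simp [pvEnc, hc],
      ih h']
    congr 1
    simp only [List.length_cons]
    push_cast
    ring

theorem pvEnc_nondots (run : List Char) (h : ∀ x ∈ run, x ≠ '.') :
    ∀ (rest : List Char),
    pvEnc 0 (run ++ rest) = run ++ pvEnc 0 rest := by
  induction run with
  | nil => intro rest; simp
  | cons c cs ih =>
    intro rest
    have hc : c ≠ '.' := h c (by simp)
    have h' : ∀ x ∈ cs, x ≠ '.' := fun x hx => h x (by simp [hx])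
    simp [pvEnc, hc, ih h']

theorem pvEnc_flush (k : Int) (hk : k ≠ 0) (rest : List Char)
    (hrest : rest = [] ∨ ∃ c cs, rest = c :: cs ∧ c ≠ '.') :
    pvEnc k rest = PySem.Int.toChars k ++ pvEnc 0 rest := by
  rcases hrest with h | ⟨c, cs, rfl, hc⟩
  · subst h; simp [pvEnc, hk]
  · simp [pvEnc, hc, hk]

theorem pvEnc_eq_pieces (n : ℕ) : ∀ (l : List Char), l.length ≤ n →
    pvEnc 0 l = (pvAltPieces l).flatten := by
  induction n with
  | zero =>
    intro l hl
    have : l = [] := List.eq_nil_of_length_eq_zero (Nat.le_zero.mp hl)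
    subst this; simp [pvEnc, pvAltPieces]
  | succ n ih =>
    intro l hl
    match l with
    | [] => simp [pvEnc, pvAltPieces]
    | c :: cs =>
      rw [pvAltPieces]
      set p : Char → Bool := fun x => (x == '.') == (c == '.') with hp
      have hpc : p c = true := by simp [hp]
      have hsplit : (c :: cs) = (c :: cs).takeWhile p ++ (c :: cs).dropWhile p :=
        (List.takeWhile_append_dropWhile).symm
      have htw : (c :: cs).takeWhile p = c :: cs.takeWhile p := by
        simp [List.takeWhile, hpc]
      have hdw : (c :: cs).dropWhile p = cs.dropWhile p := by
        simp [List.dropWhile, hpc]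
      have hlen : ((c :: cs).dropWhile p).length ≤ n := by
        rw [hdw]
        exact Nat.le_trans (List.length_dropWhile_le _ _) (Nat.le_of_succ_le_succ hl)
      have ihrest : pvEnc 0 ((c :: cs).dropWhile p) = (pvAltPieces ((c :: cs).dropWhile p)).flatten :=
        ih _ hlen
      have hrest_shape : (c :: cs).dropWhile p = [] ∨
          ∃ d ds, (c :: cs).dropWhile p = d :: ds ∧ p d = false := by
        cases hdrop : (c :: cs).dropWhile p with
        | nil => exact Or.inl rfl
        | cons d ds =>
          refine Or.inr ⟨d, ds, rfl, ?_⟩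
          have := List.head_dropWhile_not p (l := c :: cs) (by simp [hdrop])
          simpa [hdrop] using this
      by_cases hc : c = '.'
      · -- dot run
        have hall : ∀ x ∈ (c :: cs).takeWhile p, x = '.' := by
          intro x hx
          have := List.mem_takeWhile_imp hx
          simpa [hp, hc] using this
        have h1 : pvEnc 0 (c :: cs)
            = pvEnc (((c :: cs).takeWhile p).length) ((c :: cs).dropWhile p) := by
          conv_lhs => rw [hsplit]
          rw [pvEnc_dots _ hall]
          norm_num
        have hklen : (((c :: cs).takeWhile p).length : Int) ≠ 0 := by
          rw [htw]; simp; omega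
        have hshape' : (c :: cs).dropWhile p = [] ∨
            ∃ d ds, (c :: cs).dropWhile p = d :: ds ∧ d ≠ '.' := by
          rcases hrest_shape with h | ⟨d, ds, hdd, hpd⟩
          · exact Or.inl h
          · refine Or.inr ⟨d, ds, hdd, ?_⟩
            intro hdq
            rw [hp] at hpd; simp [hdq, hc] at hpd
        rw [h1, pvEnc_flush _ hklen _ hshape', ihrest]
        simp [hc]
      · -- non-dot run
        have hall : ∀ x ∈ (c :: cs).takeWhile p, x ≠ '.' := by
          intro x hx hxq
          have := List.mem_takeWhile_imp hx
          rw [hp] at this; simp [hxq, hc] at this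
        have h1 : pvEnc 0 (c :: cs)
            = (c :: cs).takeWhile p ++ pvEnc 0 ((c :: cs).dropWhile p) := by
          conv_lhs => rw [hsplit]
          exact pvEnc_nondots _ hall _
        rw [h1, ihrest]
        simp [hc]

-- ===== VERDICT (by name: the statement is the Claim_ definition above) =====
theorem get_message_from_normal_line_py_spec : Claim_equal_get_message_from_normal_line_py := by
  intro line _
  unfold Spec_get_message_from_normal_line_py get_message_from_normal_line_py get_message_from_normal_line_py_alt
  have h1 := pvFoldA_eq_enc line.toList [] 0
  simp only [List.nil_append] at h1
  rw [h1]
  exact congrArg String.mk (pvEnc_eq_pieces line.toList.length line.toList le_rfl)
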